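-- pv_equiv track=rewrite | github.com/digwit678/OpenEvent-AI-FORK | scripts/skills/retrospective.py | append_to_section
-- ===== SOURCE A (Python) =====
-- def append_to_section(lines: list[str], section: str, note_block: list[str]) -> list[str]:
--     header = f"## {section}"
--     section_start = None
--     for idx, line in enumerate(lines):
--         if line.strip() == header:
--             section_start = idx
--             break
--     if section_start is None:
--         lines = lines + ["", header]
--         section_start = len(lines) - 1
--
--     section_end = len(lines)
--     for idx in range(section_start + 1, len(lines)):
--         if lines[idx].startswith("## "):
--             section_end = idx
--             break
--
--     insert_lines = []
--     if section_end > 0 and lines[section_end - 1].strip():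
--         insert_lines.append("")
--     insert_lines.extend(note_block)
--     insert_lines.append("")
--     return lines[:section_end] + insert_lines + lines[section_end:]
-- ===== SOURCE B (Python) =====
-- def append_to_section(lines: list[str], section: str, note_block: list[str]) -> list[str]:
--     header = f"## {section}"
--     # parse into segments: a preamble plus one block per line starting with "## "
--     segs, cur = [], []
--     for line in lines:
--         if line.startswith("## "):
--             segs.append(cur)
--             cur = [line]
--         else:
--             cur.append(line)
--     segs.append(cur)
--     # the target is the first segment containing a line matching the header
--     hit = next((i for i, seg in enumerate(segs) if any(l.strip() == header for l in seg)), None)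
--     if hit is None:
--         segs.append(["", header])
--         hit = len(segs) - 1
--     tgt = segs[hit]  # non-empty: it contains the match (or is the freshly added block)
--     pad = [""] if tgt[-1].strip() else []
--     segs[hit] = tgt + pad + note_block + [""]
--     return [l for seg in segs for l in seg]
-- ===== Notes on version B (the rewrite author's own statement) =====
-- stated objective: alternative
-- what changed: B parses the lines into a preamble plus explicit '## '-delimited section blocks, splices the note into the first block containing the matching header, and flattens back, instead of A's index arithmetic (two scans plus slicing) on the flat list.
import Mathlib
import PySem

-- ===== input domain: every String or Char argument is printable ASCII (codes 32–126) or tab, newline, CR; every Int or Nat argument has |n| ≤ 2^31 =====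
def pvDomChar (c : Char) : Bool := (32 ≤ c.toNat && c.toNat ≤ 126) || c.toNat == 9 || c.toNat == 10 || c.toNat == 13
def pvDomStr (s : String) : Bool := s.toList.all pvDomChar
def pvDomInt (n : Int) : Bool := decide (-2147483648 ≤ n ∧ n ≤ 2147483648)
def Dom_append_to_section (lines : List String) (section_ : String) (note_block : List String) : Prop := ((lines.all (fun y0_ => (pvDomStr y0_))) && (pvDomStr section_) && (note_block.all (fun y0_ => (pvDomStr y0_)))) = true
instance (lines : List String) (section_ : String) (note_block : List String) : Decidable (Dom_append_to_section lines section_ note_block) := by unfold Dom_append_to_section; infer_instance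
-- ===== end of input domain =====

-- B parses the lines into a preamble plus explicit '## '-delimited section blocks and splices the note
-- into the matching block, instead of A's index arithmetic on the flat list (alternative decomposition, same cost).

-- ===== PORT A =====
-- second loop of A (search for the next '## ' header from sectionStart+1) and the tail of A's body;
-- lines.getD (sectionEnd-1) "" ports lines[section_end - 1]: guarded by sectionEnd ≠ 0, and sectionEnd ≤ lines.length always, so in range
def appendCore (lines : List String) (sectionStart : Nat) (note_block : List String) : List String :=
  let sectionEnd : Nat :=
    match (lines.drop (sectionStart + 1)).findIdx? (fun l => PySem.Str.startswith l "## ") with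
    | none => lines.length
    | some j => sectionStart + 1 + j
  let insertLines :=
    (if sectionEnd != 0 && (PySem.Str.strip (lines.getD (sectionEnd - 1) "") != "") then [""] else [])
      ++ note_block ++ [""]
  lines.take sectionEnd ++ insertLines ++ lines.drop sectionEnd

def append_to_section (lines : List String) (section_ : String) (note_block : List String) : List String :=
  let header := "## " ++ section_
  match lines.findIdx? (fun line => PySem.Str.strip line == header) with
  | none =>
      let lines := lines ++ ["", header]
      appendCore lines (lines.length - 1) note_block
  | some sectionStart => appendCore lines sectionStart note_block

-- ===== PORT B =====
-- one step of B's segmentation loop (state: finished segments, current segment)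
def segsStep (acc : List (List String) × List String) (line : String) : List (List String) × List String :=
  if PySem.Str.startswith line "## " then (acc.1 ++ [acc.2], [line]) else (acc.1, acc.2 ++ [line])

def append_to_section_alt (lines : List String) (section_ : String) (note_block : List String) : List String :=
  let header := "## " ++ section_
  let st := lines.foldl segsStep ([], [])
  let segs := st.1 ++ [st.2]
  let (segs, hit) :=
    match segs.findIdx? (fun seg => seg.any (fun l => PySem.Str.strip l == header)) with
    | some k => (segs, k)
    | none => (segs ++ [["", header]], segs.length)
  let tgt := segs.getD hit []
  -- tgt[-1]: tgt is non-empty (it contains the match, or is the freshly added block), so getLastD is exact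
  let pad := if PySem.Str.strip (tgt.getLastD "") != "" then [""] else []
  (segs.set hit (tgt ++ pad ++ note_block ++ [""])).flatten

-- ===== PRECONDITION & SPEC =====
def Spec_append_to_section (lines : List String) (section_ : String) (note_block : List String) (out : List String) : Prop := out = append_to_section_alt lines section_ note_block
instance (lines : List String) (section_ : String) (note_block : List String) (out : List String) : Decidable (Spec_append_to_section lines section_ note_block out) := by unfold Spec_append_to_section; infer_instance

-- ===== CLAIM (what is proved, stated in full; the proofs are below) =====
def Claim_equal_append_to_section : Prop := ∀ (lines : List String) (section_ : String) (note_block : List String), Dom_append_to_section lines section_ note_block → Spec_append_to_section lines section_ note_block (append_to_section lines section_ note_block)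

-- ===== LEMMAS AND PROOFS =====

-- the two predicates of both programs
def pB (l : String) : Bool := PySem.Str.startswith l "## "
def qB (header : String) (l : String) : Bool := PySem.Str.strip l == header

-- reference recursion: walk to the first header match, splice at the end of its block
def Rfun (header : String) (nb : List String) : List String → List String
  | [] => "" :: header :: ((if PySem.Str.strip header != "" then [""] else []) ++ nb ++ [""])
  | x :: xs =>
    if qB header x then
      let j := (xs.findIdx? pB).getD xs.length
      let body := xs.take j
      x :: (body ++ (if PySem.Str.strip (body.getLastD x) != "" then [""] else [])
              ++ nb ++ [""] ++ xs.drop j)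
    else x :: Rfun header nb xs

theorem findIdx?_lt {p : String → Bool} {l : List String} {j : Nat}
    (h : List.findIdx? p l = some j) : j < l.length :=
  (List.findIdx?_eq_some_iff_getElem.mp h).1

theorem getD_cons_eq_getLastD_take (x : String) (xs : List String) (j : Nat) (h : j ≤ xs.length) :
    (x :: xs).getD j "" = (xs.take j).getLastD x := by
  induction xs generalizing x j with
  | nil => simp at h; subst h; simp
  | cons y ys ih =>
    cases j with
    | zero => simp
    | succ j =>
      simp only [List.getD_cons_succ, List.take_succ_cons, List.getLastD_cons]
      exact ih y j (by simpa using h)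

-- A's sectionEnd as a function
def secEnd (lines : List String) (s : Nat) : Nat :=
  match (lines.drop (s + 1)).findIdx? (fun l => PySem.Str.startswith l "## ") with
  | none => lines.length
  | some j => s + 1 + j

theorem appendCore_eq (lines : List String) (s : Nat) (nb : List String) :
    appendCore lines s nb
      = lines.take (secEnd lines s)
        ++ ((if secEnd lines s != 0 && (PySem.Str.strip (lines.getD (secEnd lines s - 1) "") != "")
              then [""] else []) ++ nb ++ [""])
        ++ lines.drop (secEnd lines s) := rfl

theorem secEnd_pos (xs : List String) (s : Nat) (h : s < xs.length) : 0 < secEnd xs s := by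
  unfold secEnd
  cases (xs.drop (s + 1)).findIdx? (fun l => PySem.Str.startswith l "## ") <;> simp <;> omega

theorem secEnd_cons (x : String) (xs : List String) (s : Nat) :
    secEnd (x :: xs) (s + 1) = secEnd xs s + 1 := by
  unfold secEnd
  simp only [List.drop_succ_cons]
  cases hf : (xs.drop (s + 1)).findIdx? (fun l => PySem.Str.startswith l "## ") <;>
    simp [hf] <;> omega

theorem secEnd_zero (x : String) (xs : List String) :
    secEnd (x :: xs) 0 = ((xs.findIdx? pB).getD xs.length) + 1 := by
  unfold secEnd pB
  simp only [List.drop_succ_cons, List.drop_zero]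
  cases hf : xs.findIdx? (fun l => PySem.Str.startswith l "## ") <;> simp [hf] <;> omega

theorem getD_le_bound (xs : List String) : ((xs.findIdx? pB).getD xs.length) ≤ xs.length := by
  cases hf : xs.findIdx? pB with
  | none => simp
  | some j => simpa using (findIdx?_lt hf).le

-- A's tail after skipping a non-matching first line
theorem appendCore_cons (x : String) (xs : List String) (s : Nat) (nb : List String)
    (h : s < xs.length) : appendCore (x :: xs) (s + 1) nb = x :: appendCore xs s nb := by
  rw [appendCore_eq, appendCore_eq, secEnd_cons]
  obtain ⟨m, hm⟩ : ∃ m, secEnd xs s = m + 1 :=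
    ⟨secEnd xs s - 1, by have := secEnd_pos xs s h; omega⟩
  rw [hm]
  simp [List.take_succ_cons, List.drop_succ_cons, List.getD_cons_succ]


-- A on the found path equals the reference recursion
theorem coreR (header : String) (nb : List String) :
    ∀ (lines : List String) (s : Nat), lines.findIdx? (qB header) = some s →
      appendCore lines s nb = Rfun header nb lines := by
  intro lines
  induction lines with
  | nil => intro s h; simp [List.findIdx?, List.findIdx?.go] at h
  | cons x xs ih =>
    intro s h
    rw [List.findIdx?_cons] at h
    by_cases hq : qB header x = true
    · simp only [hq, if_pos] at h
      obtain rfl : s = 0 := by simpa using h.symm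
      rw [appendCore_eq, secEnd_zero]
      have hle := getD_le_bound xs
      obtain ⟨j, hj⟩ : ∃ j, (xs.findIdx? pB).getD xs.length = j := ⟨_, rfl⟩
      rw [hj] at hle ⊢
      simp only [Rfun, hq, if_pos, List.take_succ_cons, List.drop_succ_cons,
        Nat.add_sub_cancel, bne_iff_ne, ne_eq, Nat.succ_ne_zero, not_false_iff, true_and, hj]
      rw [getD_cons_eq_getLastD_take x xs j hle]
      simp
    · simp only [hq, if_neg, Bool.false_eq_true, not_false_iff, if_false] at h
      obtain ⟨s', hs', rfl⟩ := Option.map_eq_some_iff.mp h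
      rw [appendCore_cons x xs s' nb (findIdx?_lt hs'), ih s' hs']
      simp [Rfun, hq]

-- the reference recursion on the not-found path
theorem R_not_found (header : String) (nb : List String) (lines : List String)
    (h : lines.findIdx? (qB header) = none) :
    Rfun header nb lines
      = lines ++ "" :: header :: ((if PySem.Str.strip header != "" then [""] else []) ++ nb ++ [""]) := by
  induction lines with
  | nil => simp [Rfun]
  | cons x xs ih =>
    rw [List.findIdx?_cons] at h
    by_cases hq : qB header x = true
    · simp [hq] at h
    · simp only [hq, if_neg, Bool.false_eq_true, not_false_iff, if_false, Option.map_eq_none_iff] at h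
      simp [Rfun, hq, ih h]

theorem A_eq_R (lines : List String) (section_ : String) (nb : List String) :
    append_to_section lines section_ nb = Rfun ("## " ++ section_) nb lines := by
  simp only [append_to_section]
  have hpred : (fun line => PySem.Str.strip line == ("## " ++ section_)) = qB ("## " ++ section_) := rfl
  rw [hpred]
  cases hf : lines.findIdx? (qB ("## " ++ section_)) with
  | some s => exact coreR _ nb lines s hf
  | none =>
    rw [R_not_found _ nb lines hf]
    have hL : (lines ++ ["", "## " ++ section_]).length = lines.length + 2 := by simp
    rw [hL]
    have h2 : lines.length + 2 - 1 = lines.length + 1 := by omega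
    rw [h2, appendCore_eq]
    have hse : secEnd (lines ++ ["", "## " ++ section_]) (lines.length + 1) = lines.length + 2 := by
      unfold secEnd
      rw [show (lines ++ ["", "## " ++ section_]).drop (lines.length + 1 + 1) = [] from by
        apply List.drop_eq_nil_of_le; simp]
      simp [List.findIdx?, List.findIdx?.go]
    rw [hse]
    have hget : (lines ++ ["", "## " ++ section_]).getD (lines.length + 2 - 1) "" = "## " ++ section_ := by
      rw [List.getD_eq_getElem?_getD, show lines.length + 2 - 1 = lines.length + 1 from by omega,
        List.getElem?_append_right (by omega)]
      simp
    rw [hget]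
    rw [show (lines ++ ["", "## " ++ section_]).take (lines.length + 2) = lines ++ ["", "## " ++ section_] from by
      apply List.take_of_length_le; simp]
    rw [List.drop_eq_nil_of_le (by simp)]
    simp

-- ===== B side =====

-- head block and remaining blocks of B's segmentation
def segsHd : List String → List String
  | [] => []
  | x :: xs => if pB x then [] else x :: segsHd xs

def segsTl : List String → List (List String)
  | [] => []
  | x :: xs => if pB x then (x :: segsHd xs) :: segsTl xs else segsTl xs

def consHd' (cur : List String) : List (List String) → List (List String)
  | [] => [cur]
  | s :: t => (cur ++ s) :: t

theorem foldl_segs (lines : List String) (done : List (List String)) (cur : List String) :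
    (lines.foldl segsStep (done, cur)).1 ++ [(lines.foldl segsStep (done, cur)).2]
      = done ++ consHd' cur (segsHd lines :: segsTl lines) := by
  induction lines generalizing done cur with
  | nil => simp [segsHd, segsTl, consHd']
  | cons x xs ih =>
    simp only [List.foldl_cons, segsStep, segsHd, segsTl, pB]
    by_cases hp : PySem.Str.startswith x "## " = true
    · simp only [hp, if_pos]
      rw [ih]
      simp [consHd']
    · simp only [hp, if_neg, Bool.false_eq_true, not_false_iff]
      rw [ih]
      simp [consHd']

-- the selection-and-splice part of B, on segment lists
def Ffun (header : String) (nb : List String) (segs : List (List String)) : List String :=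
  match segs.findIdx? (fun seg => seg.any (qB header)) with
  | some k =>
      let tgt := segs.getD k []
      (segs.set k (tgt ++ (if PySem.Str.strip (tgt.getLastD "") != "" then [""] else []) ++ nb ++ [""])).flatten
  | none =>
      segs.flatten ++ "" :: header :: ((if PySem.Str.strip header != "" then [""] else []) ++ nb ++ [""])

theorem B_eq_F (lines : List String) (section_ : String) (nb : List String) :
    append_to_section_alt lines section_ nb
      = Ffun ("## " ++ section_) nb (segsHd lines :: segsTl lines) := by
  have hsegs : (lines.foldl segsStep ([], [])).1 ++ [(lines.foldl segsStep ([], [])).2]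
      = segsHd lines :: segsTl lines := by
    simpa [consHd'] using foldl_segs lines [] []
  unfold append_to_section_alt Ffun
  simp only [hsegs]
  have hq : (fun l => PySem.Str.strip l == ("## " ++ section_)) = qB ("## " ++ section_) := rfl
  rw [hq]
  cases hf : List.findIdx? (fun seg => seg.any (qB ("## " ++ section_))) (segsHd lines :: segsTl lines) with
  | some k => simp [hf]
  | none =>
    simp only [hf]
    have hlen : (segsHd lines :: segsTl lines).length = (segsTl lines).length + 1 := by simp
    simp [List.getD_append, List.set_append, List.flatten_append]

theorem segsHd_take (xs : List String) :
    segsHd xs = xs.take ((xs.findIdx? pB).getD xs.length) := by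
  induction xs with
  | nil => simp [segsHd]
  | cons x xs ih =>
    rw [List.findIdx?_cons]
    by_cases hp : pB x = true
    · simp [segsHd, hp]
    · simp only [segsHd, hp, if_neg, Bool.false_eq_true, not_false_iff, if_false]
      cases hf : xs.findIdx? pB <;> simp [hf, ih] <;> rw [ih] <;> simp [hf]

theorem segsTl_flatten (xs : List String) :
    (segsTl xs).flatten = xs.drop ((xs.findIdx? pB).getD xs.length) := by
  induction xs with
  | nil => simp [segsTl]
  | cons x xs ih =>
    rw [List.findIdx?_cons]
    by_cases hp : pB x = true
    · simp only [hp, if_pos, Option.getD_some, List.drop_zero, segsTl, List.flatten_cons]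
      rw [segsHd_take]
      have h1 : (xs.findIdx? pB).getD xs.length ≤ xs.length := by
        cases hf : xs.findIdx? pB with
        | none => simp
        | some j => simpa using (findIdx?_lt hf).le
      simp [ih, List.cons_append]
    · simp only [segsTl, hp, if_neg, Bool.false_eq_true, not_false_iff, if_false]
      cases hf : xs.findIdx? pB <;> simp [hf] at ih ⊢ <;> simpa using ih

theorem F_cons_nil (header : String) (nb : List String) (s : List String) (t : List (List String)) :
    Ffun header nb ([] :: s :: t) = Ffun header nb (s :: t) := by
  unfold Ffun
  rw [List.findIdx?_cons]
  simp only [List.any_nil, Bool.false_eq_true, if_false]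
  cases hf : List.findIdx? (fun seg => seg.any (qB header)) (s :: t) with
  | none => simp [hf]
  | some k => simp [hf]

-- pushing one line into the head block
theorem F_push (header : String) (nb : List String) (x : String) (xs : List String)
    (ih : Ffun header nb (segsHd xs :: segsTl xs) = Rfun header nb xs) :
    Ffun header nb ((x :: segsHd xs) :: segsTl xs) = Rfun header nb (x :: xs) := by
  by_cases hq : qB header x = true
  · have hpred : ((x :: segsHd xs).any (qB header)) = true := by simp [hq]
    simp only [Ffun, List.findIdx?_cons, hpred, if_pos, List.getD_cons_zero,
      List.set_cons_zero, List.flatten_cons, List.getLastD_cons]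
    simp only [Rfun, hq, if_pos]
    rw [segsHd_take, segsTl_flatten]
    simp [List.append_assoc]
  · have hany : ((x :: segsHd xs).any (qB header)) = ((segsHd xs).any (qB header)) := by
      simp [hq]
    cases hA : (segsHd xs).any (qB header) with
    | true =>
      have hpred : ((x :: segsHd xs).any (qB header)) = true := by rw [hany]; exact hA
      obtain ⟨y, ys, hH⟩ : ∃ y ys, segsHd xs = y :: ys := by
        cases hHd : segsHd xs with
        | nil => rw [hHd] at hA; simp at hA
        | cons y ys => exact ⟨y, ys, rfl⟩
      simp only [Ffun, List.findIdx?_cons, hpred, hA, if_pos, List.getD_cons_zero,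
        List.set_cons_zero, List.flatten_cons] at ih ⊢
      rw [hH] at ih ⊢
      simp only [List.getLastD_cons] at ih ⊢
      simp only [Rfun, hq, Bool.false_eq_true, if_false, List.cons_append, List.flatten_cons]
      rw [← ih]
      simp
    | false =>
      have hpred : ((x :: segsHd xs).any (qB header)) = false := by rw [hany]; exact hA
      simp only [Ffun, List.findIdx?_cons, hpred, hA, Bool.false_eq_true, if_false]
      simp only [Rfun, hq, Bool.false_eq_true, if_false]
      rw [← ih]
      simp only [Ffun, List.findIdx?_cons, hA, Bool.false_eq_true, if_false]
      cases hT : (segsTl xs).findIdx? (fun seg => seg.any (qB header)) with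
      | none => simp [hT]
      | some k => simp [hT, List.getD_cons_succ, List.set_cons_succ]

theorem F_eq_R (header : String) (nb : List String) : ∀ (lines : List String),
    Ffun header nb (segsHd lines :: segsTl lines) = Rfun header nb lines := by
  intro lines
  induction lines with
  | nil => simp [segsHd, segsTl, Ffun, Rfun, List.findIdx?, List.findIdx?.go]
  | cons x xs ih =>
    by_cases hp : pB x = true
    · simp only [segsHd, segsTl, hp, if_pos]
      rw [F_cons_nil]
      exact F_push header nb x xs ih
    · simp only [segsHd, segsTl, hp, Bool.false_eq_true, if_false]
      exact F_push header nb x xs ih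

theorem B_eq_R (lines : List String) (section_ : String) (nb : List String) :
    append_to_section_alt lines section_ nb = Rfun ("## " ++ section_) nb lines := by
  rw [B_eq_F, F_eq_R]

-- ===== VERDICT (by name: the statement is the Claim_ definition above) =====
theorem append_to_section_spec : Claim_equal_append_to_section := by
  intro lines section_ nb _
  unfold Spec_append_to_section
  rw [A_eq_R, B_eq_R]
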